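-- pv_equiv track=rewrite | github.com/mathias-granlund/netloom | arapy/clearpass.py | _service_cli_actions
-- ===== SOURCE A (Python) =====
-- CLI_ACTION_ORDER = ["get", "add", "delete", "update", "replace"]
--
-- def _service_cli_actions(service_entry: dict) -> list[str]:
--     actions = service_entry.get("actions") or {}
--     cli_actions: list[str] = []
--     if "get" in actions or "list" in actions:
--         cli_actions.append("get")
--     for action in CLI_ACTION_ORDER[1:]:
--         if action in actions:
--             cli_actions.append(action)
--     return cli_actions
-- ===== SOURCE B (Python) =====
-- CLI_ACTION_ORDER = ["get", "add", "delete", "update", "replace"]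
-- _RANK = {a: i for i, a in enumerate(CLI_ACTION_ORDER)}
-- _RANK["list"] = _RANK["get"]
--
-- def _service_cli_actions(service_entry: dict) -> list[str]:
--     actions = service_entry.get("actions") or {}
--     ranks = {_RANK[a] for a in actions if a in _RANK}
--     return [CLI_ACTION_ORDER[i] for i in sorted(ranks)]
-- ===== Notes on version B (the rewrite author's own statement) =====
-- stated objective: alternative
-- what changed: Instead of scanning the constant action order with a special-cased get branch plus tail loop, B scans the input's action keys once, maps each known key (with list aliased to get) to its numeric rank, and sorts the resulting rank set, indexing back into the constant order.
import Mathlib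
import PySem

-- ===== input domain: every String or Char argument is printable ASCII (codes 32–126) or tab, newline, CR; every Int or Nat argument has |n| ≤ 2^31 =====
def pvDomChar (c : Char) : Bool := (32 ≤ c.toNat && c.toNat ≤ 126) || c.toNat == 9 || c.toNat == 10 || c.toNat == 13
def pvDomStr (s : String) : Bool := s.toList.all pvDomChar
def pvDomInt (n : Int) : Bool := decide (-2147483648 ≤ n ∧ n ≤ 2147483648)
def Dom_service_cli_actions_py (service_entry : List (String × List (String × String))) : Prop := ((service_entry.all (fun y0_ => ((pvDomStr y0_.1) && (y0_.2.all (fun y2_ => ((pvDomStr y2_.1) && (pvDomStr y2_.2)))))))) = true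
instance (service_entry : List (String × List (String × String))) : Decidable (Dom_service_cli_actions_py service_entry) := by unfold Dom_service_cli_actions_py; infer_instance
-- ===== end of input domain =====

-- B scans the input's action keys once, maps each known key (list aliased to get) to its
-- numeric rank and sorts the rank set, instead of A's scan of the constant order (objective: alternative).

def cliActionOrder : List String := ["get", "add", "delete", "update", "replace"]

-- ===== PORT A =====
def service_cli_actions_py (service_entry : List (String × List (String × String))) : List String :=
  -- actions = service_entry.get("actions") or {}   ('or {}' : the empty dict is falsy, so None and {} both give {})
  let actions := (PySem.Dict.get? (PySem.Dict.mk service_entry) "actions").getD []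
  let cli_actions : List String := []
  let cli_actions :=
    if PySem.Dict.contains (PySem.Dict.mk actions) "get" || PySem.Dict.contains (PySem.Dict.mk actions) "list" then
      cli_actions ++ ["get"]
    else cli_actions
  -- for action in CLI_ACTION_ORDER[1:]: …
  (PySem.List.slice cliActionOrder (some 1) none).foldl
    (fun acc action => if PySem.Dict.contains (PySem.Dict.mk actions) action then acc ++ [action] else acc)
    cli_actions

-- ===== PORT B =====
-- _RANK = {a: i for i, a in enumerate(CLI_ACTION_ORDER)}; _RANK["list"] = _RANK["get"]
def rankDict : PySem.Dict String Int :=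
  ((((((PySem.Dict.empty.insert "get" 0).insert "add" 1).insert "delete" 2).insert "update" 3).insert
      "replace" 4).insert "list" 0)

def service_cli_actions_py_alt (service_entry : List (String × List (String × String))) : List String :=
  let actions := (PySem.Dict.get? (PySem.Dict.mk service_entry) "actions").getD []
  -- ranks = {_RANK[a] for a in actions if a in _RANK}   (iterating the dict's keys in insertion order)
  let ranks : PySem.Set Int :=
    (PySem.Dict.keys (PySem.Dict.mk actions)).foldl
      (fun s a => match PySem.Dict.get? rankDict a with
        | some r => PySem.Set.add s r
        | none => s)
      PySem.Set.empty
  -- [CLI_ACTION_ORDER[i] for i in sorted(ranks)]  (every rank is in range, so [] never raises; pyGetD is exact here)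
  (PySem.List.sorted ranks (fun x => x) false).map (fun i => PySem.List.pyGetD cliActionOrder i "")

-- ===== PRECONDITION & SPEC =====
def Spec_service_cli_actions_py (service_entry : List (String × List (String × String))) (out : List String) : Prop := out = service_cli_actions_py_alt service_entry
instance (service_entry : List (String × List (String × String))) (out : List String) : Decidable (Spec_service_cli_actions_py service_entry out) := by unfold Spec_service_cli_actions_py; infer_instance

-- ===== CLAIM (what is proved, stated in full; the proofs are below) =====
def Claim_equal_service_cli_actions_py : Prop := ∀ (service_entry : List (String × List (String × String))), Dom_service_cli_actions_py service_entry → Spec_service_cli_actions_py service_entry (service_cli_actions_py service_entry)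

-- ===== LEMMAS AND PROOFS =====

-- membership in the rank set built by B's fold
theorem mem_ranks_foldl (ks : List String) (s : PySem.Set Int) (y : Int) :
    (y ∈ ks.foldl
      (fun s a => match PySem.Dict.get? rankDict a with
        | some r => PySem.Set.add s r
        | none => s) s)
    ↔ y ∈ s ∨ ∃ a ∈ ks, PySem.Dict.get? rankDict a = some y := by
  induction ks generalizing s with
  | nil => simp
  | cons a t ih =>
    simp only [List.foldl_cons, ih]
    cases h : PySem.Dict.get? rankDict a with
    | none => simp [h]
    | some r =>
      simp only [PySem.Set.mem_add, List.mem_cons]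
      constructor
      · rintro (((hy | rfl) | ⟨b, hb, hbr⟩))
        · exact Or.inl hy
        · exact Or.inr ⟨a, Or.inl rfl, h⟩
        · exact Or.inr ⟨b, Or.inr hb, hbr⟩
      · rintro (hy | ⟨b, (rfl | hb), hbr⟩)
        · exact Or.inl (Or.inl hy)
        · rw [h] at hbr; exact Or.inl (Or.inr (Option.some.inj hbr).symm)
        · exact Or.inr ⟨b, hb, hbr⟩

theorem nodup_ranks_foldl (ks : List String) (s : PySem.Set Int) (h : s.Nodup) :
    (ks.foldl
      (fun s a => match PySem.Dict.get? rankDict a with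
        | some r => PySem.Set.add s r
        | none => s) s).Nodup := by
  induction ks generalizing s with
  | nil => exact h
  | cons a t ih =>
    simp only [List.foldl_cons]
    cases hr : PySem.Dict.get? rankDict a with
    | none => exact ih s h
    | some r => exact ih _ (PySem.Set.nodup_add _ _ h)

-- which keys the rank dict maps to which rank
theorem rank_char (a : String) (y : Int) :
    PySem.Dict.get? rankDict a = some y ↔
      ((a = "get" ∨ a = "list") ∧ y = 0) ∨ (a = "add" ∧ y = 1) ∨ (a = "delete" ∧ y = 2) ∨
      (a = "update" ∧ y = 3) ∨ (a = "replace" ∧ y = 4) := by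
  simp only [rankDict, PySem.Dict.get?_insert, PySem.Dict.get?_empty]
  split_ifs <;> simp_all <;> omega

-- sorted(ranks) named from the five membership booleans
theorem sorted_ranks_eq (ranks : PySem.Set Int) (hnd : ranks.Nodup) (c0 c1 c2 c3 c4 : Bool)
    (hmem : ∀ y : Int, y ∈ ranks ↔
      (y = 0 ∧ c0 = true) ∨ (y = 1 ∧ c1 = true) ∨ (y = 2 ∧ c2 = true) ∨
      (y = 3 ∧ c3 = true) ∨ (y = 4 ∧ c4 = true)) :
    PySem.List.sorted ranks (fun x => x) false =
      (if c0 then [(0 : Int)] else []) ++ (if c1 then [1] else []) ++ (if c2 then [2] else []) ++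
      (if c3 then [3] else []) ++ (if c4 then [4] else []) := by
  apply PySem.List.sorted_eq_of_perm_of_pairwise_lt
  · rw [List.perm_ext_iff_of_nodup (by cases c0 <;> cases c1 <;> cases c2 <;> cases c3 <;> cases c4 <;> decide) hnd]
    intro y
    rw [hmem]
    cases c0 <;> cases c1 <;> cases c2 <;> cases c3 <;> cases c4 <;> simp
  · cases c0 <;> cases c1 <;> cases c2 <;> cases c3 <;> cases c4 <;> decide

-- ===== VERDICT (by name: the statement is the Claim_ definition above) =====
theorem service_cli_actions_py_spec : Claim_equal_service_cli_actions_py := by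
  intro e _
  show service_cli_actions_py e = service_cli_actions_py_alt e
  simp only [service_cli_actions_py, service_cli_actions_py_alt]
  generalize (PySem.Dict.get? (PySem.Dict.mk e) "actions").getD [] = actions
  rw [sorted_ranks_eq _ (nodup_ranks_foldl (PySem.Dict.keys (PySem.Dict.mk actions)) PySem.Set.empty (by decide))
        (PySem.Dict.contains (PySem.Dict.mk actions) "get" || PySem.Dict.contains (PySem.Dict.mk actions) "list")
        (PySem.Dict.contains (PySem.Dict.mk actions) "add")
        (PySem.Dict.contains (PySem.Dict.mk actions) "delete")
        (PySem.Dict.contains (PySem.Dict.mk actions) "update")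
        (PySem.Dict.contains (PySem.Dict.mk actions) "replace")
        ?_]
  · have hs : PySem.List.slice ["get", "add", "delete", "update", "replace"] (some 1) none = ["add", "delete", "update", "replace"] := by decide
    simp only [cliActionOrder, hs, List.foldl]
    generalize PySem.Dict.contains (PySem.Dict.mk actions) "get" = bg
    generalize PySem.Dict.contains (PySem.Dict.mk actions) "list" = bl
    generalize PySem.Dict.contains (PySem.Dict.mk actions) "add" = ba
    generalize PySem.Dict.contains (PySem.Dict.mk actions) "delete" = bd
    generalize PySem.Dict.contains (PySem.Dict.mk actions) "update" = bu
    generalize PySem.Dict.contains (PySem.Dict.mk actions) "replace" = br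
    cases bg <;> cases bl <;> cases ba <;> cases bd <;> cases bu <;> cases br <;> decide
  · intro y
    rw [mem_ranks_foldl]
    simp only [PySem.Set.empty, List.not_mem_nil, false_or]
    have hk : ∀ b : String, PySem.Dict.contains (PySem.Dict.mk actions) b = true ↔
        b ∈ PySem.Dict.keys (PySem.Dict.mk actions) := fun b => PySem.Dict.contains_iff_mem_keys _ b
    constructor
    · rintro ⟨a, ha, har⟩
      rcases (rank_char a y).1 har with ⟨(rfl | rfl), rfl⟩ | ⟨rfl, rfl⟩ | ⟨rfl, rfl⟩ | ⟨rfl, rfl⟩ | ⟨rfl, rfl⟩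
      · exact Or.inl ⟨rfl, by rw [(hk _).2 ha]; simp⟩
      · exact Or.inl ⟨rfl, by rw [(hk _).2 ha]; simp⟩
      · exact Or.inr (Or.inl ⟨rfl, (hk _).2 ha⟩)
      · exact Or.inr (Or.inr (Or.inl ⟨rfl, (hk _).2 ha⟩))
      · exact Or.inr (Or.inr (Or.inr (Or.inl ⟨rfl, (hk _).2 ha⟩)))
      · exact Or.inr (Or.inr (Or.inr (Or.inr ⟨rfl, (hk _).2 ha⟩)))
    · rintro (⟨rfl, hc⟩ | ⟨rfl, hc⟩ | ⟨rfl, hc⟩ | ⟨rfl, hc⟩ | ⟨rfl, hc⟩)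
      · rw [Bool.or_eq_true] at hc
        rcases hc with h | h
        · exact ⟨"get", (hk _).1 h, (rank_char _ _).2 (Or.inl ⟨Or.inl rfl, rfl⟩)⟩
        · exact ⟨"list", (hk _).1 h, (rank_char _ _).2 (Or.inl ⟨Or.inr rfl, rfl⟩)⟩
      · exact ⟨"add", (hk _).1 hc, (rank_char _ _).2 (Or.inr (Or.inl ⟨rfl, rfl⟩))⟩
      · exact ⟨"delete", (hk _).1 hc, (rank_char _ _).2 (Or.inr (Or.inr (Or.inl ⟨rfl, rfl⟩)))⟩
      · exact ⟨"update", (hk _).1 hc, (rank_char _ _).2 (Or.inr (Or.inr (Or.inr (Or.inl ⟨rfl, rfl⟩))))⟩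
      · exact ⟨"replace", (hk _).1 hc, (rank_char _ _).2 (Or.inr (Or.inr (Or.inr (Or.inr ⟨rfl, rfl⟩))))⟩
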